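-- pv_equiv track=rewrite | github.com/IamShobe/killbrute | src/killbrute/core/pattern/parser.py | _parse_charset_bracket
-- ===== SOURCE A (Python) =====
-- LEFT_CHARSET_BRACKET = "{"
--
-- RIGHT_CHARSET_BRACKET = "}"
--
-- def _parse_charset_bracket(char_index, pattern):
--     possibilities = []
--     while char_index < len(pattern):
--         ch = pattern[char_index]
--         if ch == LEFT_CHARSET_BRACKET:
--             raise RuntimeError("There cant be brackets inside of brackets")
--
--         if ch == RIGHT_CHARSET_BRACKET:
--             return char_index, "".join(possibilities)
--
--         possibilities.append(ch)
--         char_index += 1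
--
--     raise RuntimeError("No closing bracket found!")
-- ===== SOURCE B (Python) =====
-- LEFT_CHARSET_BRACKET = "{"
--
-- RIGHT_CHARSET_BRACKET = "}"
--
--
-- def _parse_charset_bracket(char_index, pattern):
--     close = pattern.find(RIGHT_CHARSET_BRACKET, char_index)
--     open_ = pattern.find(LEFT_CHARSET_BRACKET, char_index)
--     if open_ != -1 and (close == -1 or open_ < close):
--         raise RuntimeError("There cant be brackets inside of brackets")
--     if close == -1:
--         raise RuntimeError("No closing bracket found!")
--     return close, pattern[char_index:close]
-- ===== Notes on version B (the rewrite author's own statement) =====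
-- stated objective: simpler
-- what changed: Replaces the char-by-char while-loop with an accumulator list by two str.find calls locating the first '{' and '}' from char_index, then a single slice pattern[char_index:close].
-- outside the precondition, e.g. on _parse_charset_bracket(-1, '}'): A returns (-1, ''), B returns (0, '')
import Mathlib
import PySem

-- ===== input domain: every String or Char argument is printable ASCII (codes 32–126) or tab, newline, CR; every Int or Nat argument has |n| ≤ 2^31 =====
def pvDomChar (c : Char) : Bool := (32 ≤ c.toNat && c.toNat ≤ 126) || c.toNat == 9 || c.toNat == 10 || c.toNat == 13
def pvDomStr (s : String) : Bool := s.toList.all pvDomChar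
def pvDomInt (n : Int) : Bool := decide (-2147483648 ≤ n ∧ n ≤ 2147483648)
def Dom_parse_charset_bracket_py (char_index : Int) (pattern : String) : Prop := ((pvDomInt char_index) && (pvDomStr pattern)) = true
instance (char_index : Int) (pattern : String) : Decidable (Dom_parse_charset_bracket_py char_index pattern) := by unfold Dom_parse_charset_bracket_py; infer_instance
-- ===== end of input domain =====

-- B replaces A's char-by-char scan with two find calls plus one slice; objective: simpler.


-- ===== PORT A =====
-- while char_index < len(pattern): ch = pattern[char_index]; raise / return / append + continue.
-- Where the Python raises (RuntimeError, or IndexError on a far-negative index) the port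
-- returns the sentinel (-1, ""); Pre_ excludes those inputs.
def parseALoop (pattern : String) (char_index : Int) (possibilities : List Char) : Int × String :=
  if _h : char_index < PySem.Str.len pattern then
    match PySem.Str.pyGet? pattern char_index with
    | none => (-1, "")              -- IndexError (unreachable under Pre_)
    | some ch =>
      if ch = '{' then (-1, "")     -- raise RuntimeError("There cant be brackets inside of brackets")
      else if ch = '}' then (char_index, String.ofList possibilities)  -- "".join of single chars
      else parseALoop pattern (char_index + 1) (possibilities ++ [ch])
  else (-1, "")                     -- raise RuntimeError("No closing bracket found!")
termination_by (PySem.Str.len pattern - char_index).toNat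
decreasing_by
  simp only [PySem.Str.len_eq] at *
  omega

def parse_charset_bracket_py (char_index : Int) (pattern : String) : Int × String :=
  parseALoop pattern char_index []

-- ===== PORT B =====
def parse_charset_bracket_py_alt (char_index : Int) (pattern : String) : Int × String :=
  let close := PySem.Str.findFrom pattern "}" char_index none
  let open_ := PySem.Str.findFrom pattern "{" char_index none
  if open_ ≠ -1 ∧ (close = -1 ∨ open_ < close) then (-1, "")   -- raise RuntimeError (nested bracket)
  else if close = -1 then (-1, "")                              -- raise RuntimeError (no closing bracket)
  else (close, PySem.Str.slice pattern (some char_index) (some close))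

-- ===== PRECONDITION & SPEC =====
-- Pre_ keeps exactly the inputs of the function's natural domain on which A returns normally:
-- a non-negative start index and, scanning from it, a '}' occurring before any '{'.
-- It excludes negative char_index (outside the natural domain: A's value there comes from
-- Python's negative-index wraparound; see the cite in claim.json) and all inputs where A raises.
def Pre_parse_charset_bracket_py (char_index : Int) (pattern : String) : Prop :=
  0 ≤ char_index ∧
  (pattern.toList.drop char_index.toNat).find? (fun c => c == '{' || c == '}') = some '}'
instance (char_index : Int) (pattern : String) : Decidable (Pre_parse_charset_bracket_py char_index pattern) := by unfold Pre_parse_charset_bracket_py; infer_instance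

def pvWitness_parse_charset_bracket_py : Int × String := (1, "{ab}c")

def Spec_parse_charset_bracket_py (char_index : Int) (pattern : String) (out : Int × String) : Prop := out = parse_charset_bracket_py_alt char_index pattern
instance (char_index : Int) (pattern : String) (out : Int × String) : Decidable (Spec_parse_charset_bracket_py char_index pattern out) := by unfold Spec_parse_charset_bracket_py; infer_instance

-- ===== CLAIM (what is proved, stated in full; the proofs are below) =====
def Claim_equal_parse_charset_bracket_py : Prop := ∀ (char_index : Int) (pattern : String), Dom_parse_charset_bracket_py char_index pattern → Pre_parse_charset_bracket_py char_index pattern → Spec_parse_charset_bracket_py char_index pattern (parse_charset_bracket_py char_index pattern)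

-- ===== LEMMAS AND PROOFS =====

-- a one-character list is a prefix exactly of lists whose head is that character
theorem pv_singleton_prefix_iff (a : Char) (u : List Char) : [a] <+: u ↔ u.head? = some a := by
  constructor
  · rintro ⟨v, rfl⟩; rfl
  · intro h
    cases u with
    | nil => simp at h
    | cons x xs => simp at h; exact ⟨xs, by simp [h]⟩

-- a one-character list is an infix exactly of lists containing that character
theorem pv_singleton_infix_iff (a : Char) (u : List Char) : [a] <:+: u ↔ a ∈ u := by
  constructor
  · intro h; exact (List.singleton_sublist).mp h.sublist
  · intro h
    obtain ⟨v, w, rfl⟩ := List.append_of_mem h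
    exact ⟨v, w, by simp⟩

-- characterisation of A's loop on the inputs Pre_ admits: it walks over the brace-free
-- prefix s of the tail, appending it to the accumulator, and stops at the '}' after it
theorem pv_loopEq (pattern : String) (s : List Char) : ∀ (rest acc : List Char) (n : Nat),
    pattern.toList.drop n = s ++ '}' :: rest → (∀ c ∈ s, c ≠ '{' ∧ c ≠ '}') →
    parseALoop pattern (n : Int) acc = ((n : Int) + s.length, String.ofList (acc ++ s)) := by
  induction s with
  | nil =>
    intro rest acc n hd _
    have hn : n < pattern.toList.length := by
      by_contra h
      rw [List.drop_eq_nil_of_le (by omega)] at hd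
      simp at hd
    have hget : pattern.toList[n]? = some '}' := by
      have h0 : (List.drop n pattern.toList)[0]? = pattern.toList[n + 0]? := List.getElem?_drop
      rw [hd] at h0; simpa using h0.symm
    rw [parseALoop]
    rw [dif_pos (by simp only [PySem.Str.len_eq]; exact_mod_cast hn)]
    simp only [PySem.Str.pyGet?_eq, PySem.Chars.pyGet?_eq_listPyGet?, PySem.List.pyGet?_natCast, hget]
    simp
  | cons c s ih =>
    intro rest acc n hd hs
    have hn : n < pattern.toList.length := by
      by_contra h
      rw [List.drop_eq_nil_of_le (by omega)] at hd
      simp at hd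
    have hget : pattern.toList[n]? = some c := by
      have h0 : (List.drop n pattern.toList)[0]? = pattern.toList[n + 0]? := List.getElem?_drop
      rw [hd] at h0; simpa using h0.symm
    have hc := hs c (by simp)
    have hd' : pattern.toList.drop (n + 1) = s ++ '}' :: rest := by
      have h1 : pattern.toList.drop (n + 1) = (pattern.toList.drop n).drop 1 := by
        rw [List.drop_drop]
      rw [h1, hd]; simp
    have hrec := ih rest (acc ++ [c]) (n + 1) hd' (fun x hx => hs x (by simp [hx]))
    rw [parseALoop]
    rw [dif_pos (by simp only [PySem.Str.len_eq]; exact_mod_cast hn)]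
    simp only [PySem.Str.pyGet?_eq, PySem.Chars.pyGet?_eq_listPyGet?, PySem.List.pyGet?_natCast, hget]
    rw [if_neg hc.1, if_neg hc.2]
    have hcast : (n : Int) + 1 = ((n + 1 : Nat) : Int) := by push_cast; ring
    rw [hcast, hrec]
    simp only [Prod.mk.injEq]
    constructor
    · push_cast [List.length_cons]; ring
    · simp

-- the element of pattern at offset j ≤ s.length past n, under the decomposition
theorem pv_getElem_decomp (pattern : String) (s rest : List Char) (n : Nat)
    (hd : pattern.toList.drop n = s ++ '}' :: rest) (j : Nat) (hj : j ≤ s.length) :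
    pattern.toList[n + j]? = some (if j = s.length then '}' else s[j]!) := by
  have h0 : (List.drop n pattern.toList)[j]? = pattern.toList[n + j]? := List.getElem?_drop
  rw [hd] at h0
  rw [← h0]
  by_cases h : j = s.length
  · subst h; simp
  · have hj' : j < s.length := by omega
    rw [List.getElem?_append_left hj']
    simp [h, List.getElem!_eq_getElem?_getD, (List.getElem?_eq_getElem hj')]

-- B's close = first '}' from n lands exactly at n + s.length
theorem pv_close_eq (pattern : String) (s rest : List Char) (n : Nat)
    (hd : pattern.toList.drop n = s ++ '}' :: rest) (hs : ∀ c ∈ s, c ≠ '{' ∧ c ≠ '}') :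
    PySem.Str.findFrom pattern "}" (n : Int) none = (n : Int) + s.length := by
  have hn : n ≤ pattern.toList.length := by
    by_contra h
    rw [List.drop_eq_nil_of_le (by omega)] at hd
    simp at hd
  have hjl : ("}" : String).toList = ['}'] := rfl
  have hne : PySem.Str.findFrom pattern "}" (n : Int) none ≠ -1 := by
    rw [PySem.Str.findFrom_eq]
    intro hcon
    apply (PySem.Chars.findFrom_natCast_eq_neg_one_iff pattern.toList "}".toList n hn).mp hcon
    rw [hjl, hd]
    exact (pv_singleton_infix_iff _ _).mpr (by simp)
  rw [PySem.Str.findFrom_eq] at hne ⊢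
  obtain ⟨hle, hpre, hmin⟩ := PySem.Chars.findFrom_natCast_spec pattern.toList "}".toList n hn hne
  set f := PySem.Chars.findFrom pattern.toList "}".toList (n : Int) none with hf
  have hf0 : 0 ≤ f := le_trans (by omega) hle
  have hhead : pattern.toList[f.toNat]? = some '}' := by
    rw [hjl] at hpre
    have h1 := (pv_singleton_prefix_iff '}' (pattern.toList.drop f.toNat)).mp hpre
    rw [List.head?_drop] at h1
    exact h1
  have hnle : n ≤ f.toNat := by omega
  have heq : f.toNat = n + s.length := by
    by_contra hne2
    rcases Nat.lt_or_ge f.toNat (n + s.length) with hlt | hge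
    · -- f would point inside the brace-free prefix s
      have hj : f.toNat - n < s.length := by omega
      have h2 := pv_getElem_decomp pattern s rest n hd (f.toNat - n) (by omega)
      rw [show n + (f.toNat - n) = f.toNat by omega, hhead] at h2
      have h3 : ('}' : Char) = s[f.toNat - n]! := by
        simpa [Nat.ne_of_lt hj] using h2
      have hmem : s[f.toNat - n]! ∈ s := by
        rw [List.getElem!_eq_getElem?_getD, List.getElem?_eq_getElem hj]
        simp [List.getElem_mem]
      exact (hs _ hmem).2 h3.symm
    · -- f past the '}' would contradict minimality at n + s.length
      have hlt2 : n + s.length < f.toNat := by omega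
      apply hmin (n + s.length) (by omega) hlt2
      rw [hjl, pv_singleton_prefix_iff, List.head?_drop]
      exact pv_getElem_decomp pattern s rest n hd s.length (le_refl _) |>.trans (by simp)
  omega

-- B's open_ = first '{' from n is -1 or strictly past n + s.length
theorem pv_open_far (pattern : String) (s rest : List Char) (n : Nat)
    (hd : pattern.toList.drop n = s ++ '}' :: rest) (hs : ∀ c ∈ s, c ≠ '{' ∧ c ≠ '}') :
    PySem.Str.findFrom pattern "{" (n : Int) none = -1 ∨
    (n : Int) + s.length < PySem.Str.findFrom pattern "{" (n : Int) none := by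
  have hn : n ≤ pattern.toList.length := by
    by_contra h
    rw [List.drop_eq_nil_of_le (by omega)] at hd
    simp at hd
  have hjl : ("{" : String).toList = ['{'] := rfl
  by_cases hne : PySem.Str.findFrom pattern "{" (n : Int) none = -1
  · exact Or.inl hne
  right
  rw [PySem.Str.findFrom_eq] at hne ⊢
  obtain ⟨hle, hpre, _⟩ := PySem.Chars.findFrom_natCast_spec pattern.toList "{".toList n hn hne
  set g := PySem.Chars.findFrom pattern.toList "{".toList (n : Int) none with hg
  have hg0 : 0 ≤ g := le_trans (by omega) hle
  have hhead : pattern.toList[g.toNat]? = some '{' := by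
    rw [hjl] at hpre
    have h1 := (pv_singleton_prefix_iff '{' (pattern.toList.drop g.toNat)).mp hpre
    rw [List.head?_drop] at h1
    exact h1
  have hnle : n ≤ g.toNat := by omega
  have hfar : n + s.length < g.toNat := by
    by_contra hcon
    have hj : g.toNat - n ≤ s.length := by omega
    have h2 := pv_getElem_decomp pattern s rest n hd (g.toNat - n) hj
    rw [show n + (g.toNat - n) = g.toNat by omega, hhead] at h2
    by_cases hjs : g.toNat - n = s.length
    · simp [hjs] at h2
    · have hj2 : g.toNat - n < s.length := by omega
      have h3 : ('{' : Char) = s[g.toNat - n]! := by simpa [hjs] using h2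
      have hmem : s[g.toNat - n]! ∈ s := by
        rw [List.getElem!_eq_getElem?_getD, List.getElem?_eq_getElem hj2]
        simp [List.getElem_mem]
      exact (hs _ hmem).1 h3.symm
  omega

-- B's value on the inputs Pre_ admits
theorem pv_altEq (pattern : String) (s rest : List Char) (n : Nat)
    (hd : pattern.toList.drop n = s ++ '}' :: rest) (hs : ∀ c ∈ s, c ≠ '{' ∧ c ≠ '}') :
    parse_charset_bracket_py_alt (n : Int) pattern = ((n : Int) + s.length, String.ofList s) := by
  have hclose := pv_close_eq pattern s rest n hd hs
  have hopen := pv_open_far pattern s rest n hd hs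
  have hclosene : (n : Int) + (s.length : Int) ≠ -1 := by omega
  unfold parse_charset_bracket_py_alt
  rw [hclose]
  rw [if_neg]
  · rw [if_neg hclosene]
    have hslice : PySem.Str.slice pattern (some (n : Int)) (some ((n : Int) + s.length)) = String.ofList s := by
      apply String.toList_inj.mp
      rw [PySem.Str.toList_slice]
      have hcast : ((n : Int) + (s.length : Int)) = (((n + s.length : Nat) : Int)) := by push_cast; ring
      rw [hcast, PySem.Chars.slice_eq_listSlice, PySem.List.slice_natCast, hd]
      simp [String.toList_ofList]
    rw [hslice]
  · rintro ⟨hne, hor⟩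
    rcases hopen with h1 | h1
    · exact hne h1
    rcases hor with h2 | h2
    · exact hclosene h2
    · omega

-- ===== VERDICT (by name: the statement is the Claim_ definition above) =====
theorem parse_charset_bracket_py_spec : Claim_equal_parse_charset_bracket_py := by
  intro char_index pattern _hdom hpre
  obtain ⟨h0, hfind⟩ := hpre
  rw [List.find?_eq_some_iff_append] at hfind
  obtain ⟨-, as, bs, hd, hnone⟩ := hfind
  have hs : ∀ c ∈ as, c ≠ '{' ∧ c ≠ '}' := by
    intro c hc
    have h1 := hnone c hc
    simp at h1
    exact h1
  have hci : char_index = ((char_index.toNat : Nat) : Int) := (Int.toNat_of_nonneg h0).symm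
  show parse_charset_bracket_py char_index pattern = parse_charset_bracket_py_alt char_index pattern
  rw [hci, pv_altEq pattern as bs char_index.toNat hd hs]
  unfold parse_charset_bracket_py
  have h2 := pv_loopEq pattern as bs [] char_index.toNat hd hs
  simpa using h2
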